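-- pv_equiv track=rewrite | github.com/LUCAS-LYX025/qa-toolkit | src/qa_toolkit/utils/regex_tools.py | _build_length_pattern
-- ===== SOURCE A (Python) =====
-- from typing import Any, Dict, Iterable, List, Sequence, Tuple
--
-- def _build_length_pattern(charset: str, values: Sequence[str]) -> str:
--     lengths = sorted({len(value) for value in values})
--     if not lengths:
--         return ""
--     if lengths == [1]:
--         return charset
--     if len(lengths) == 1:
--         return f"{charset}{{{lengths[0]}}}"
--     return f"{charset}{{{lengths[0]},{lengths[-1]}}}"
-- ===== SOURCE B (Python) =====
-- def _build_length_pattern(charset, values):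
--     if not values:
--         return ""
--     lo = hi = len(values[0])
--     for v in values[1:]:
--         if len(v) < lo:
--             lo = len(v)
--         elif len(v) > hi:
--             hi = len(v)
--     if lo == hi:
--         return charset if lo == 1 else f"{charset}{{{lo}}}"
--     return f"{charset}{{{lo},{hi}}}"
-- ===== Notes on version B (the rewrite author's own statement) =====
-- stated objective: simpler
-- what changed: Replaced building a distinct-length set and sorting it with a single explicit pass tracking the running min and max length; the branch structure is decided from lo/hi alone.
import Mathlib
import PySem

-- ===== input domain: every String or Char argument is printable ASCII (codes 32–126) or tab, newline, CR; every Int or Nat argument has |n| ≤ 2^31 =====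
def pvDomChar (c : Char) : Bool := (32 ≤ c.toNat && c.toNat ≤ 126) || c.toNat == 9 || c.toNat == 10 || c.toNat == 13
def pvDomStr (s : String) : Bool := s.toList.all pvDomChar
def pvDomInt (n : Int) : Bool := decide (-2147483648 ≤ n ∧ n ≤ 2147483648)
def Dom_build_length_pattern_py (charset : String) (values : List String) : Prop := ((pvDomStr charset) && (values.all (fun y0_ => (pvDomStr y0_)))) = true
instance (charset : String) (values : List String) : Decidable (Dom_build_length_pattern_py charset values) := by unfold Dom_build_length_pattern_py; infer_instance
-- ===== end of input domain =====

-- B replaces A's build-a-distinct-set-then-sort with one explicit pass tracking the running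
-- min and max length (objective: simpler).

-- ===== PORT A =====
def build_length_pattern_py (charset : String) (values : List String) : String :=
  let lengths := PySem.List.sorted (PySem.Set.ofList (values.map (fun v => PySem.Str.len v))) (fun x => x) false
  if lengths = [] then ""
  else if lengths = [(1 : Int)] then charset
  else if lengths.length = 1 then
    -- lengths[0]: the index is in range here, so pyGetD with a default is exact
    charset ++ "{" ++ PySem.Int.toStr (PySem.List.pyGetD lengths 0 0) ++ "}"
  else
    charset ++ "{" ++ PySem.Int.toStr (PySem.List.pyGetD lengths 0 0) ++ ","
            ++ PySem.Int.toStr (PySem.List.pyGetD lengths (-1) 0) ++ "}"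

-- ===== PORT B =====
def build_length_pattern_py_alt (charset : String) (values : List String) : String :=
  match values with
  | [] => ""
  | v :: vs =>
    let p := vs.foldl (fun (p : Int × Int) w =>
        if PySem.Str.len w < p.1 then (PySem.Str.len w, p.2)
        else if p.2 < PySem.Str.len w then (p.1, PySem.Str.len w) else p)
      (PySem.Str.len v, PySem.Str.len v)
    if p.1 = p.2 then
      (if p.1 = 1 then charset else charset ++ "{" ++ PySem.Int.toStr p.1 ++ "}")
    else charset ++ "{" ++ PySem.Int.toStr p.1 ++ "," ++ PySem.Int.toStr p.2 ++ "}"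

-- ===== PRECONDITION & SPEC =====
def Spec_build_length_pattern_py (charset : String) (values : List String) (out : String) : Prop := out = build_length_pattern_py_alt charset values
instance (charset : String) (values : List String) (out : String) : Decidable (Spec_build_length_pattern_py charset values out) := by unfold Spec_build_length_pattern_py; infer_instance

-- ===== CLAIM (what is proved, stated in full; the proofs are below) =====
def Claim_equal_build_length_pattern_py : Prop := ∀ (charset : String) (values : List String), Dom_build_length_pattern_py charset values → Spec_build_length_pattern_py charset values (build_length_pattern_py charset values)

-- ===== LEMMAS AND PROOFS =====

-- B's fold computes the running min and max of the lengths.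
theorem pv_fold_eq_minmax (vs : List String) (a b : Int) (hab : a ≤ b) :
    vs.foldl (fun (p : Int × Int) w =>
        if PySem.Str.len w < p.1 then (PySem.Str.len w, p.2)
        else if p.2 < PySem.Str.len w then (p.1, PySem.Str.len w) else p) (a, b)
      = ((vs.map PySem.Str.len).foldl min a, (vs.map PySem.Str.len).foldl max b) := by
  induction vs generalizing a b with
  | nil => rfl
  | cons w ws ih =>
    simp only [List.foldl_cons, List.map_cons]
    have hstep : (if PySem.Str.len w < a then ((PySem.Str.len w), b)
        else if b < PySem.Str.len w then (a, PySem.Str.len w) else (a, b))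
        = (min a (PySem.Str.len w), max b (PySem.Str.len w)) := by
      rcases Int.lt_or_le (PySem.Str.len w) a with h | h
      · rw [if_pos h, min_eq_right (le_of_lt h), max_eq_left (by omega)]
      · rw [if_neg (by omega), min_eq_left h]
        rcases Int.lt_or_le b (PySem.Str.len w) with h2 | h2
        · rw [if_pos h2, max_eq_right (le_of_lt h2)]
        · rw [if_neg (by omega), max_eq_left h2]
    rw [hstep]
    exact ih _ _ (le_trans (min_le_left a _) (le_trans hab (le_max_left b _)))

theorem pv_foldl_min_mem (xs : List Int) (a : Int) : xs.foldl min a ∈ a :: xs := by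
  induction xs generalizing a with
  | nil => simp
  | cons x xs ih =>
    simp only [List.foldl_cons]
    rcases List.mem_cons.mp (ih (min a x)) with h | h
    · rcases min_choice a x with hc | hc <;> rw [hc] at h ⊢ <;> simp [h]
    · simp [h]

theorem pv_foldl_min_le (xs : List Int) (a : Int) : ∀ y ∈ a :: xs, xs.foldl min a ≤ y := by
  induction xs generalizing a with
  | nil => simp
  | cons x xs ih =>
    intro y hy
    simp only [List.foldl_cons]
    have hle : xs.foldl min (min a x) ≤ min a x := ih (min a x) (min a x) (by simp)
    rcases List.mem_cons.mp hy with rfl | hy'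
    · exact le_trans hle (min_le_left _ _)
    · rcases List.mem_cons.mp hy' with rfl | hy'' 
      · exact le_trans hle (min_le_right _ _)
      · exact ih (min a x) y (by simp [hy''])

theorem pv_foldl_max_mem (xs : List Int) (a : Int) : xs.foldl max a ∈ a :: xs := by
  induction xs generalizing a with
  | nil => simp
  | cons x xs ih =>
    simp only [List.foldl_cons]
    rcases List.mem_cons.mp (ih (max a x)) with h | h
    · rcases max_choice a x with hc | hc <;> rw [hc] at h ⊢ <;> simp [h]
    · simp [h]

theorem pv_foldl_max_ge (xs : List Int) (a : Int) : ∀ y ∈ a :: xs, y ≤ xs.foldl max a := by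
  induction xs generalizing a with
  | nil => simp
  | cons x xs ih =>
    intro y hy
    simp only [List.foldl_cons]
    have hge : max a x ≤ xs.foldl max (max a x) := ih (max a x) (max a x) (by simp)
    rcases List.mem_cons.mp hy with rfl | hy'
    · exact le_trans (le_max_left _ _) hge
    · rcases List.mem_cons.mp hy' with rfl | hy''
      · exact le_trans (le_max_right _ _) hge
      · exact ih (max a x) y (by simp [hy''])

-- every member of a strictly increasing list is ≤ its last element
theorem pv_le_getLast? (s : List Int) :
    s.Pairwise (· < ·) → ∀ x ∈ s, ∀ z : Int, s.getLast? = some z → x ≤ z := by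
  induction s with
  | nil => intro _ x hx; simp at hx
  | cons m t ih =>
    intro hpw x hx z hz
    cases t with
    | nil =>
      simp at hx hz; omega
    | cons b u =>
      rw [List.getLast?_cons_cons] at hz
      have hzmem : z ∈ b :: u := List.mem_of_getLast? hz
      rcases List.mem_cons.mp hx with rfl | hx'
      · exact le_of_lt ((List.pairwise_cons.mp hpw).1 z hzmem)
      · exact ih (List.Pairwise.of_cons hpw) x hx' z hz

theorem build_length_pattern_py_spec_aux (charset : String) (values : List String) :
    build_length_pattern_py charset values = build_length_pattern_py_alt charset values := by
  cases values with
  | nil => rfl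
  | cons v vs =>
    have hA : build_length_pattern_py charset (v :: vs) =
        (if PySem.List.sorted (PySem.Set.ofList ((v :: vs).map (fun w => PySem.Str.len w))) (fun x => x) false = [] then ""
         else if PySem.List.sorted (PySem.Set.ofList ((v :: vs).map (fun w => PySem.Str.len w))) (fun x => x) false = [(1 : Int)] then charset
         else if (PySem.List.sorted (PySem.Set.ofList ((v :: vs).map (fun w => PySem.Str.len w))) (fun x => x) false).length = 1 then
           charset ++ "{" ++ PySem.Int.toStr (PySem.List.pyGetD (PySem.List.sorted (PySem.Set.ofList ((v :: vs).map (fun w => PySem.Str.len w))) (fun x => x) false) 0 0) ++ "}"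
         else
           charset ++ "{" ++ PySem.Int.toStr (PySem.List.pyGetD (PySem.List.sorted (PySem.Set.ofList ((v :: vs).map (fun w => PySem.Str.len w))) (fun x => x) false) 0 0) ++ ","
                   ++ PySem.Int.toStr (PySem.List.pyGetD (PySem.List.sorted (PySem.Set.ofList ((v :: vs).map (fun w => PySem.Str.len w))) (fun x => x) false) (-1) 0) ++ "}") := rfl
    have hB : build_length_pattern_py_alt charset (v :: vs) =
        (let p := vs.foldl (fun (p : Int × Int) w =>
            if PySem.Str.len w < p.1 then (PySem.Str.len w, p.2)
            else if p.2 < PySem.Str.len w then (p.1, PySem.Str.len w) else p)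
          (PySem.Str.len v, PySem.Str.len v)
         if p.1 = p.2 then
           (if p.1 = 1 then charset else charset ++ "{" ++ PySem.Int.toStr p.1 ++ "}")
         else charset ++ "{" ++ PySem.Int.toStr p.1 ++ "," ++ PySem.Int.toStr p.2 ++ "}") := rfl
    rw [hA, hB]
    simp only [pv_fold_eq_minmax vs (PySem.Str.len v) (PySem.Str.len v) le_rfl]
    set L : List Int := (v :: vs).map (fun w => PySem.Str.len w) with hL
    set s : List Int := PySem.List.sorted (PySem.Set.ofList L) (fun x => x) false with hs
    set lo : Int := (vs.map PySem.Str.len).foldl min (PySem.Str.len v) with hlo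
    set hi : Int := (vs.map PySem.Str.len).foldl max (PySem.Str.len v) with hhi
    have hmem : ∀ x : Int, x ∈ s ↔ x ∈ L := by
      intro x
      rw [hs, PySem.List.mem_sorted, PySem.Set.mem_ofList]
    have hpw : s.Pairwise (· < ·) := by
      rw [hs]; exact PySem.List.sorted_ofList_pairwise_lt L
    have hsne : s ≠ [] := by
      intro h0
      have : PySem.Str.len v ∈ s := (hmem _).2 (by simp [hL])
      simp [h0] at this
    have hLcons : PySem.Str.len v :: vs.map PySem.Str.len = L := by simp [hL]
    have hlo_mem : lo ∈ L := by rw [← hLcons]; exact pv_foldl_min_mem _ _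
    have hlo_le : ∀ y ∈ L, lo ≤ y := by rw [← hLcons]; exact pv_foldl_min_le _ _
    have hhi_mem : hi ∈ L := by rw [← hLcons]; exact pv_foldl_max_mem _ _
    have hhi_ge : ∀ y ∈ L, y ≤ hi := by rw [← hLcons]; exact pv_foldl_max_ge _ _
    obtain ⟨m, t, hst⟩ := List.exists_cons_of_ne_nil hsne
    have hm_lo : m = lo := by
      have h1 : m ≤ lo := by
        have := PySem.List.key_head_sorted_le (xs := PySem.Set.ofList L)
          (key := fun x => x) (m := m) (t := t) (by rw [← hs, hst])
        exact this lo (by rw [PySem.Set.mem_ofList]; exact hlo_mem)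
      have h2 : lo ≤ m := hlo_le m ((hmem m).1 (by simp [hst]))
      omega
    obtain ⟨z, hz⟩ := Option.isSome_iff_exists.mp (List.getLast?_isSome.mpr hsne)
    have hz_mem : z ∈ s := List.mem_of_getLast? hz
    have hz_hi : z = hi := by
      have h1 : z ≤ hi := hhi_ge _ ((hmem _).1 hz_mem)
      have h2 : hi ≤ z := pv_le_getLast? s hpw hi ((hmem hi).2 hhi_mem) _ hz
      omega
    by_cases ht : t = []
    · -- single distinct length: lo = hi = m
      subst ht
      have hzm : z = m := by rw [hst] at hz; simp at hz; omega
      have hhi_m : hi = m := by omega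
      by_cases h1 : m = 1
      · simp [hst, ← hm_lo, hhi_m, h1]
      · have hne1 : ¬ ((m : Int) :: ([] : List Int) = [1]) := by simp [h1]
        simp [hst, hne1, ← hm_lo, hhi_m, h1, PySem.List.pyGetD_zero_cons]
    · -- at least two distinct lengths: lo < hi
      have hlt : m < z := by
        rw [hst] at hz
        cases t with
        | nil => exact absurd rfl ht
        | cons b u =>
          rw [List.getLast?_cons_cons] at hz
          have hzt : z ∈ b :: u := List.mem_of_getLast? hz
          have := hpw; rw [hst, List.pairwise_cons] at this
          exact this.1 _ hzt
      have hne : ¬ (lo = hi) := by omega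
      have hlen : ¬ ((m :: t).length = 1) := by
        cases t with
        | nil => exact absurd rfl ht
        | cons _ _ => simp
      have hne1 : ¬ (m :: t = [(1 : Int)]) := by
        intro h; rw [h] at hlen; simp at hlen
      have hget0 : PySem.List.pyGetD (m :: t) 0 0 = m := PySem.List.pyGetD_zero_cons _ _ _
      have hgl : s.getLast hsne = z := by
        have h0 := List.getLast?_eq_some_getLast hsne
        rw [hz] at h0; exact (Option.some.inj h0).symm
      have hgetL : PySem.List.pyGetD s (-1) 0 = z := by
        rw [PySem.List.pyGetD_neg_one s 0 hsne]; exact hgl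
      simp only [hst]
      have hgetL' : PySem.List.pyGetD (m :: t) (-1) 0 = z := by rw [← hst]; exact hgetL
      simp [hne1, hget0, hgetL', ← hm_lo, hz_hi]
      rw [if_neg ht, if_neg (show ¬ m = hi from by omega)]

-- ===== VERDICT (by name: the statement is the Claim_ definition above) =====
theorem build_length_pattern_py_spec : Claim_equal_build_length_pattern_py := by
  intro charset values _
  exact build_length_pattern_py_spec_aux charset values
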